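-- pv_equiv track=rewrite | github.com/kuparchad-gif/nexus-core | core/metatron_comprehensive.py | generate_vortex_sequence
-- ===== SOURCE A (Python) =====
-- from typing import Dict, List, Tuple
--
-- def generate_vortex_sequence(length: int = 10) -> List[int]:
--     """Generate vortex sequence with digital root patterns"""
--     sequence = []
--     current = 1
--     for _ in range(length):
--         sequence.append(current)
--         current = (current * 2) % 9
--         if current == 0:
--             current = 9
--     return sequence
-- ===== SOURCE B (Python) =====
-- CYCLE = [1, 2, 4, 8, 7, 5]
--
-- def generate_vortex_sequence(length: int = 10):
--     """Vortex sequence is periodic with period 6; index the hardcoded cycle."""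
--     return [CYCLE[i % 6] for i in range(length)]
-- ===== Notes on version B (the rewrite author's own statement) =====
-- stated objective: simpler
-- what changed: Replaced the stateful doubling-mod-9 recurrence (with the zero-to-9 fix) by direct indexing into the hardcoded period-6 cycle [1,2,4,8,7,5].
import Mathlib
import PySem

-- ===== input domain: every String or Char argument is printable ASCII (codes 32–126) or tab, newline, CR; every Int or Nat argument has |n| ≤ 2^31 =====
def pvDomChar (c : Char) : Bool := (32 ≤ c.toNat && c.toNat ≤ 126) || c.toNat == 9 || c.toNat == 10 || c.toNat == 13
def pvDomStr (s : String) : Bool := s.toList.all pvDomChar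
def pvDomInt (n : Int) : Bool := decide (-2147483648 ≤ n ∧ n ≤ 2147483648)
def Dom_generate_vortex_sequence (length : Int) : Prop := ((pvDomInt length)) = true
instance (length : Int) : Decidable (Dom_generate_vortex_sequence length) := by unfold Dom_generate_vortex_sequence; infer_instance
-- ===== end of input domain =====

-- B replaces the stateful doubling-mod-9 recurrence by indexing the hardcoded period-6 cycle (objective: simpler).

-- ===== PORT A =====
/-- A's loop body: append the current value, then current = (current*2) % 9, fixed up to 9 if 0. -/
def vstep (st : List Int × Int) (_ : Int) : List Int × Int :=
  let sequence := st.1 ++ [st.2]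
  let current := PySem.Int.mod (st.2 * 2) 9
  let current := if current = 0 then 9 else current
  (sequence, current)

def generate_vortex_sequence (length : Int) : List Int :=
  ((PySem.List.pyRange 0 length 1).foldl vstep ([], 1)).1

-- ===== PORT B =====
def vortexCycle : List Int := [1, 2, 4, 8, 7, 5]

def generate_vortex_sequence_alt (length : Int) : List Int :=
  (PySem.List.pyRange 0 length 1).map
    (fun i => PySem.List.pyGetD vortexCycle (PySem.Int.mod i 6) 0)

-- ===== PRECONDITION & SPEC =====
def Spec_generate_vortex_sequence (length : Int) (out : List Int) : Prop := out = generate_vortex_sequence_alt length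
instance (length : Int) (out : List Int) : Decidable (Spec_generate_vortex_sequence length out) := by unfold Spec_generate_vortex_sequence; infer_instance

-- ===== CLAIM (what is proved, stated in full; the proofs are below) =====
def Claim_equal_generate_vortex_sequence : Prop := ∀ (length : Int), Dom_generate_vortex_sequence length → Spec_generate_vortex_sequence length (generate_vortex_sequence length)

-- ===== LEMMAS AND PROOFS =====

/-- The value A's loop variable `current` holds at step `k`. -/
def cyc (k : Nat) : Int := vortexCycle.getD (k % 6) 0

lemma mod6_cases (j : Nat) : j % 6 = 0 ∨ j % 6 = 1 ∨ j % 6 = 2 ∨ j % 6 = 3 ∨ j % 6 = 4 ∨ j % 6 = 5 := by omega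

lemma vnext (j : Nat) :
    (if PySem.Int.mod (cyc j * 2) 9 = 0 then 9 else PySem.Int.mod (cyc j * 2) 9) = cyc (j + 1) := by
  have h1 : (j + 1) % 6 = (j % 6 + 1) % 6 := by omega
  unfold cyc
  rcases mod6_cases j with h | h | h | h | h | h <;> rw [h1, h] <;> decide

lemma vstep_cyc (acc : List Int) (j : Nat) (x : Int) :
    vstep (acc, cyc j) x = (acc ++ [cyc j], cyc (j + 1)) := by
  show (acc ++ [cyc j],
    if PySem.Int.mod (cyc j * 2) 9 = 0 then 9 else PySem.Int.mod (cyc j * 2) 9) = _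
  rw [vnext]

lemma foldl_vstep (l : List Int) (acc : List Int) (j : Nat) :
    l.foldl vstep (acc, cyc j)
      = (acc ++ (List.range l.length).map (fun k => cyc (j + k)), cyc (j + l.length)) := by
  induction l generalizing acc j with
  | nil => simp
  | cons x l ih =>
    rw [List.foldl_cons, vstep_cyc, ih]
    simp [List.range_succ_eq_map, List.map_map, Function.comp_def, Nat.add_comm, Nat.add_left_comm]

lemma pyGetD_cyc (k : Nat) :
    PySem.List.pyGetD vortexCycle ((k : Int) % 6) 0 = cyc k := by
  rw [show ((k : Int) % 6) = ((k % 6 : Nat) : Int) by push_cast; ring, PySem.List.pyGetD_natCast]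
  rfl

-- ===== VERDICT (by name: the statement is the Claim_ definition above) =====
theorem generate_vortex_sequence_spec : Claim_equal_generate_vortex_sequence := by
  intro length _
  unfold Spec_generate_vortex_sequence generate_vortex_sequence generate_vortex_sequence_alt
  rw [show (([], 1) : List Int × Int) = ([], cyc 0) from rfl, foldl_vstep,
    PySem.List.pyRange_one]
  simp [List.map_map, Function.comp_def]
  intro a _
  exact (pyGetD_cyc a).symm
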